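-- pv_equiv track=rewrite | github.com/JM-Granados/Operations-with-text-files | Operaciones con .txt.py | palabras
-- ===== SOURCE A (Python) =====
-- def palabras(texto):
--     """
--     Función que recibe un str y retorna una lista de las palabras.
--     """
--     texto = texto.lower()
--     nuevoTexto = ""
--     for c in texto:
--         if c.isalpha():
--             nuevoTexto += c
--         else:
--             nuevoTexto += " "
--     return nuevoTexto.split()
-- ===== SOURCE B (Python) =====
-- def palabras(texto):
--     """Single-pass scan: collect runs of alphabetic characters directly,
--     instead of building a space-masked copy of the text and splitting it."""
--     res = []
--     buf = []
--     for c in texto.lower():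
--         if c.isalpha():
--             buf.append(c)
--         elif buf:
--             res.append(''.join(buf))
--             buf = []
--     if buf:
--         res.append(''.join(buf))
--     return res
-- ===== Notes on version B (the rewrite author's own statement) =====
-- stated objective: alternative
-- what changed: B makes a single pass collecting runs of alphabetic characters into the result directly, instead of A's two-phase build of a space-masked copy of the text followed by .split().
import Mathlib
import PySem

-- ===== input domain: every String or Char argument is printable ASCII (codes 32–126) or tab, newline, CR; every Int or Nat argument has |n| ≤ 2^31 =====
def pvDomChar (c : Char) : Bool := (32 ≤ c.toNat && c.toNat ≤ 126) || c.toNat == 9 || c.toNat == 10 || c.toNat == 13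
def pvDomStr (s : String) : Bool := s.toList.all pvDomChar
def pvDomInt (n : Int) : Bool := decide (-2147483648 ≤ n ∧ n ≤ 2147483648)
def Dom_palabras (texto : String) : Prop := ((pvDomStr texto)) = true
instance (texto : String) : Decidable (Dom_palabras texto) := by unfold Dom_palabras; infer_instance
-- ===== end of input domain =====

-- B collects letter runs in one pass instead of masking non-letters with spaces and splitting (alternative decomposition, same cost class).

-- ===== PORT A =====
def palabras (texto : String) : List String :=
  let texto' := PySem.Str.lower texto
  let nuevoTexto : List Char :=
    texto'.toList.foldl
      (fun acc c => acc ++ [if PySem.Chars.isalpha c then c else ' ']) []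
  (PySem.Chars.split₀ nuevoTexto).map String.ofList

-- ===== PORT B =====
def palabrasAltGo : List Char → List Char → List String
  | [], buf => if buf.isEmpty then [] else [String.ofList buf.reverse]
  | c :: cs, buf =>
    if PySem.Chars.isalpha c then palabrasAltGo cs (c :: buf)
    else if buf.isEmpty then palabrasAltGo cs []
    else String.ofList buf.reverse :: palabrasAltGo cs []

def palabras_alt (texto : String) : List String :=
  palabrasAltGo (PySem.Chars.lower texto.toList) []

-- ===== PRECONDITION & SPEC =====
def Spec_palabras (texto : String) (out : List String) : Prop := out = palabras_alt texto
instance (texto : String) (out : List String) : Decidable (Spec_palabras texto out) := by unfold Spec_palabras; infer_instance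

-- ===== CLAIM (what is proved, stated in full; the proofs are below) =====
def Claim_equal_palabras : Prop := ∀ (texto : String), Dom_palabras texto → Spec_palabras texto (palabras texto)

-- ===== LEMMAS AND PROOFS =====

lemma isspace_of_isalpha (c : Char) (h : PySem.Chars.isalpha c = true) :
    PySem.Chars.isspace c = false := by
  simp only [PySem.Chars.isalpha, PySem.Chars.isupper, PySem.Chars.islower, Char.le_def,
    UInt32.le_iff_toNat_le, Bool.or_eq_true, Bool.and_eq_true, decide_eq_true_eq,
    show ('A').val.toNat = 65 from rfl, show ('Z').val.toNat = 90 from rfl,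
    show ('a').val.toNat = 97 from rfl, show ('z').val.toNat = 122 from rfl] at h
  simp only [PySem.Chars.isspace, Char.toNat, Bool.or_eq_false_iff, Bool.and_eq_false_iff,
    decide_eq_false_iff_not]
  omega

lemma go_rel (t : List Char) : ∀ (buf : List Char) (acc : List (List Char)),
    (PySem.Chars.split₀.go
        (t.map (fun c => if PySem.Chars.isalpha c then c else ' ')) buf acc).map String.ofList
      = acc.reverse.map String.ofList ++ palabrasAltGo t buf := by
  induction t with
  | nil =>
    intro buf acc
    simp only [List.map_nil, PySem.Chars.split₀.go, palabrasAltGo]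
    by_cases h : buf.isEmpty <;> simp [h]
  | cons c cs ih =>
    intro buf acc
    by_cases h : PySem.Chars.isalpha c
    · simp only [List.map_cons, PySem.Chars.split₀.go,
        isspace_of_isalpha c h, palabrasAltGo, if_pos h]
      simp only [Bool.false_eq_true, if_false]
      exact ih (c :: buf) acc
    · have hsp : PySem.Chars.isspace ' ' = true := by decide
      simp only [List.map_cons, PySem.Chars.split₀.go, hsp,
        palabrasAltGo, if_neg h, if_true]
      by_cases hb : buf.isEmpty
      · simp only [hb, if_true]
        exact ih [] acc
      · simp only [hb, Bool.false_eq_true, if_false]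
        rw [ih [] (buf.reverse :: acc)]
        simp

-- ===== VERDICT (by name: the statement is the Claim_ definition above) =====
theorem palabras_spec : Claim_equal_palabras := by
  intro texto _
  unfold Spec_palabras palabras palabras_alt
  simp only [PySem.Str.toList_lower, PySem.List.foldl_append_singleton_eq_map,
    PySem.Chars.split₀]
  exact go_rel (PySem.Chars.lower texto.toList) [] []
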